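-- pv_equiv track=rewrite | github.com/OCHA-DAP/hdx-scraper-adpc-gem | src/hdx/scraper/adpc_gem/pipeline.py | _get_years_from_rows
-- ===== SOURCE A (Python) =====
-- def _get_years_from_rows(rows: list) -> tuple:
--     """Extract min and max years from CSV rows
--
--     Args:
--         rows: List of CSV row dictionaries
--
--     Returns:
--         Tuple of (min_year, max_year)
--     """
--     years = set()
--     for row in rows:
--         year = row.get("year")
--         if year:
--             try:
--                 years.add(int(year))
--             except (ValueError, TypeError):
--                 continue
--
--     if years:
--         return min(years), max(years)
--     return 2000, 2024  # Default fallback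
-- ===== SOURCE B (Python) =====
-- def _get_years_from_rows(rows: list) -> tuple:
--     """Extract min and max years from CSV rows (single pass, running min/max)."""
--     lo = hi = None
--     for row in rows:
--         year = row.get("year")
--         if year:
--             try:
--                 v = int(year)
--             except (ValueError, TypeError):
--                 continue
--             if lo is None or v < lo:
--                 lo = v
--             if hi is None or v > hi:
--                 hi = v
--     if lo is None:
--         return 2000, 2024
--     return lo, hi
-- ===== Notes on version B (the rewrite author's own statement) =====
-- stated objective: simpler
-- what changed: Replaces the build-a-set-then-min/max approach with a single pass maintaining two running scalars lo and hi; no set and no min/max calls.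
import Mathlib
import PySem

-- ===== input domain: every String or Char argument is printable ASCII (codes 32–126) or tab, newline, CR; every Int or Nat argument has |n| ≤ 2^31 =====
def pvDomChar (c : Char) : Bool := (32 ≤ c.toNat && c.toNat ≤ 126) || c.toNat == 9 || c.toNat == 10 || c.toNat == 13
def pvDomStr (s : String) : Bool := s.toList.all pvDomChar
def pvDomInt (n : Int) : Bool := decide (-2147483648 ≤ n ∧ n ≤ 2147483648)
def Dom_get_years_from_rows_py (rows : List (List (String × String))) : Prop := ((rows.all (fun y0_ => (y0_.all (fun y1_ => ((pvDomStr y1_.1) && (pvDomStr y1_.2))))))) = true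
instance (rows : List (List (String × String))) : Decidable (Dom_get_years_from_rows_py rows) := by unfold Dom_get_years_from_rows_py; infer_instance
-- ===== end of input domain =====

-- B replaces A's build-a-set-then-min/max with a single pass keeping two running scalars (simpler; no set, no min/max call).

-- ===== PORT A =====
-- loop body of A: year = row.get("year"); if year: try: years.add(int(year)) except: continue
def getYearsStepA (years : PySem.Set Int) (row : List (String × String)) : PySem.Set Int :=
  match PySem.Dict.get? (PySem.Dict.mk row) "year" with
  | none => years
  | some year =>
    if year ≠ "" then
      match PySem.Int.ofStr? year with
      | some n => PySem.Set.add years n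
      | none => years
    else years

def get_years_from_rows_py (rows : List (List (String × String))) : Int × Int :=
  let years : PySem.Set Int := rows.foldl getYearsStepA PySem.Set.empty
  if years ≠ [] then
    -- guard makes min?/max? some; the getD default is never used
    ((PySem.List.min? years (fun x => x)).getD 0, (PySem.List.max? years (fun x => x)).getD 0)
  else (2000, 2024)

-- ===== PORT B =====
-- loop body of B: same parse/skip, then update the running (lo, hi)
def getYearsStepB (st : Option Int × Option Int) (row : List (String × String)) : Option Int × Option Int :=
  match PySem.Dict.get? (PySem.Dict.mk row) "year" with
  | none => st
  | some year =>
    if year ≠ "" then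
      match PySem.Int.ofStr? year with
      | some v =>
        ((match st.1 with | none => some v | some m => if v < m then some v else some m),
         (match st.2 with | none => some v | some m => if v > m then some v else some m))
      | none => st
    else st

def get_years_from_rows_py_alt (rows : List (List (String × String))) : Int × Int :=
  match rows.foldl getYearsStepB (none, none) with
  | (some lo, some hi) => (lo, hi)
  | _ => (2000, 2024)

-- ===== PRECONDITION & SPEC =====
def Spec_get_years_from_rows_py (rows : List (List (String × String))) (out : Int × Int) : Prop := out = get_years_from_rows_py_alt rows
instance (rows : List (List (String × String))) (out : Int × Int) : Decidable (Spec_get_years_from_rows_py rows out) := by unfold Spec_get_years_from_rows_py; infer_instance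

-- ===== CLAIM (what is proved, stated in full; the proofs are below) =====
def Claim_equal_get_years_from_rows_py : Prop := ∀ (rows : List (List (String × String))), Dom_get_years_from_rows_py rows → Spec_get_years_from_rows_py rows (get_years_from_rows_py rows)

-- ===== LEMMAS AND PROOFS =====

theorem min?_set_add (ys : List Int) (v : Int) :
    PySem.List.min? (PySem.Set.add ys v) (fun x => x) =
      some (match PySem.List.min? ys (fun x => x) with
            | none => v
            | some m => if v < m then v else m) := by
  by_cases hc : v ∈ ys
  · have hadd : PySem.Set.add ys v = ys := by
      simp [PySem.Set.add, PySem.Set.contains, hc]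
    obtain ⟨y, t, rfl⟩ : ∃ y t, ys = y :: t := by
      cases ys with
      | nil => simp at hc
      | cons y t => exact ⟨y, t, rfl⟩
    rw [hadd, PySem.List.min?_id_cons]
    have hle : List.foldl min y t ≤ v := by
      have := PySem.List.min?_isMin (xs := y :: t) (key := fun x => x)
        (m := List.foldl min y t) (by rw [PySem.List.min?_id_cons]) v hc
      simpa using this
    have : ¬ v < List.foldl min y t := not_lt.mpr hle
    simp [this]
  · have hadd : PySem.Set.add ys v = ys ++ [v] := by
      simp [PySem.Set.add, PySem.Set.contains, hc]
    rw [hadd]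
    cases ys with
    | nil => simp [PySem.List.min?]
    | cons y t =>
      rw [List.cons_append, PySem.List.min?_id_cons, PySem.List.min?_id_cons,
        List.foldl_append]
      simp only [List.foldl]
      congr 1
      rw [min_def]
      split_ifs <;> omega

theorem max?_set_add (ys : List Int) (v : Int) :
    PySem.List.max? (PySem.Set.add ys v) (fun x => x) =
      some (match PySem.List.max? ys (fun x => x) with
            | none => v
            | some m => if v > m then v else m) := by
  by_cases hc : v ∈ ys
  · have hadd : PySem.Set.add ys v = ys := by
      simp [PySem.Set.add, PySem.Set.contains, hc]
    obtain ⟨y, t, rfl⟩ : ∃ y t, ys = y :: t := by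
      cases ys with
      | nil => simp at hc
      | cons y t => exact ⟨y, t, rfl⟩
    rw [hadd, PySem.List.max?_id_cons]
    have hle : v ≤ List.foldl max y t := by
      have := PySem.List.max?_isMax (xs := y :: t) (key := fun x => x)
        (m := List.foldl max y t) (by rw [PySem.List.max?_id_cons]) v hc
      simpa using this
    have : ¬ v > List.foldl max y t := not_lt.mpr hle
    simp [this]
  · have hadd : PySem.Set.add ys v = ys ++ [v] := by
      simp [PySem.Set.add, PySem.Set.contains, hc]
    rw [hadd]
    cases ys with
    | nil => simp [PySem.List.max?]
    | cons y t =>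
      rw [List.cons_append, PySem.List.max?_id_cons, PySem.List.max?_id_cons,
        List.foldl_append]
      simp only [List.foldl]
      congr 1
      rw [max_def]
      split_ifs <;> omega

theorem step_AB (ys : List Int) (row : List (String × String)) :
    getYearsStepB (PySem.List.min? ys (fun x => x), PySem.List.max? ys (fun x => x)) row =
      (PySem.List.min? (getYearsStepA ys row) (fun x => x),
       PySem.List.max? (getYearsStepA ys row) (fun x => x)) := by
  unfold getYearsStepA getYearsStepB
  cases PySem.Dict.get? (PySem.Dict.mk row) "year" with
  | none => rfl
  | some year =>
    dsimp only
    split_ifs with hy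
    · cases PySem.Int.ofStr? year with
      | none => rfl
      | some v =>
        rw [min?_set_add, max?_set_add]
        dsimp only
        refine Prod.ext ?_ ?_ <;> dsimp only
        · cases PySem.List.min? ys (fun x => x) <;> [rfl; (dsimp only; split_ifs <;> rfl)]
        · cases PySem.List.max? ys (fun x => x) <;> [rfl; (dsimp only; split_ifs <;> rfl)]
    · rfl

theorem loop_AB (rows : List (List (String × String))) : ∀ ys : List Int,
    rows.foldl getYearsStepB (PySem.List.min? ys (fun x => x), PySem.List.max? ys (fun x => x)) =
      (PySem.List.min? (rows.foldl getYearsStepA ys) (fun x => x),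
       PySem.List.max? (rows.foldl getYearsStepA ys) (fun x => x)) := by
  induction rows with
  | nil => intro ys; rfl
  | cons r t ih =>
    intro ys
    simp only [List.foldl_cons]
    rw [step_AB]
    exact ih (getYearsStepA ys r)

-- ===== VERDICT (by name: the statement is the Claim_ definition above) =====
theorem get_years_from_rows_py_spec : Claim_equal_get_years_from_rows_py := by
  intro rows _
  unfold Spec_get_years_from_rows_py get_years_from_rows_py get_years_from_rows_py_alt
  have h0 : ((none : Option Int), (none : Option Int)) =
      (PySem.List.min? ([] : List Int) (fun x => x), PySem.List.max? ([] : List Int) (fun x => x)) := by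
    rfl
  rw [h0, loop_AB]
  cases hys : rows.foldl getYearsStepA ([] : List Int) with
  | nil => simp [PySem.Set.empty, hys, PySem.List.min?, PySem.List.max?]
  | cons y t =>
    simp [PySem.Set.empty, hys, PySem.List.min?_id_cons, PySem.List.max?_id_cons]
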